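-- pv_equiv track=rewrite | github.com/tangxikang/medical-ai-predictionv5 | web.py | _collapse_onehot_feature_names
-- ===== SOURCE A (Python) =====
-- def _collapse_onehot_feature_names(transformed_feature_names: list[str], original_feature_names: list[str]) -> list[str]:
--     original = list(original_feature_names)
--     original_set = set(original)
--     by_len = sorted(original, key=len, reverse=True)
--     collapsed: list[str] = []
--     for name in transformed_feature_names:
--         if name in original_set:
--             collapsed.append(name)
--             continue
--         match = None
--         for base in by_len:
--             if name.startswith(f"{base}_"):
--                 match = base
--                 break
--         collapsed.append(match if match is not None else name)
--     return collapsed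
-- ===== SOURCE B (Python) =====
-- def _collapse_onehot_feature_names(transformed_feature_names: list[str], original_feature_names: list[str]) -> list[str]:
--     original_set = set(original_feature_names)
--
--     def collapse(name: str) -> str:
--         if name in original_set:
--             return name
--         for i in range(len(name) - 1, -1, -1):
--             if name[i] == '_' and name[:i] in original_set:
--                 return name[:i]
--         return name
--
--     return [collapse(name) for name in transformed_feature_names]
-- ===== Notes on version B (the rewrite author's own statement) =====
-- stated objective: faster
-- what changed: Instead of scanning the length-sorted list of all base features for each name, B enumerates the name's own underscore positions from right to left and probes each prefix name[:i] against the set, so the inner loop over all bases disappears.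
import Mathlib
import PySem

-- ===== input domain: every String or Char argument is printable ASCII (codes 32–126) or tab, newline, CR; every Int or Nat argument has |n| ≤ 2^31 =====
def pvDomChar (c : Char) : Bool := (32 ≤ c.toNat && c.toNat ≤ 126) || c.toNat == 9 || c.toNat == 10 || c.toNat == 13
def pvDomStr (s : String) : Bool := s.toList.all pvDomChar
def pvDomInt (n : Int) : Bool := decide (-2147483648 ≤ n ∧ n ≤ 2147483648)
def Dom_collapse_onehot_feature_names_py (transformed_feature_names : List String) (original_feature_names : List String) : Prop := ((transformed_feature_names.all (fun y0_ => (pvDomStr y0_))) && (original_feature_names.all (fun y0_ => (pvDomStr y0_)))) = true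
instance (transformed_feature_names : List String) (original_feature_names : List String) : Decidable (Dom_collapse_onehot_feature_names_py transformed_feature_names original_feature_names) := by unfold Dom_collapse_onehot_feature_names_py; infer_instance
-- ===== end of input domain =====

-- B replaces A's per-name scan over all base features with a probe of the name's own
-- underscore-prefixes against the set (objective: alternative; faster when the base list is large).

-- ===== PORT A =====
-- inner 'for base in by_len: if name.startswith(base + "_"): break' loop
def aFirstMatch (name : List Char) : List (List Char) → Option (List Char)
  | [] => none
  | b :: rest => if (b ++ ['_']).isPrefixOf name then some b else aFirstMatch name rest

def collapse_onehot_feature_names_py (transformed_feature_names : List String) (original_feature_names : List String) : List String :=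
  let original : List (List Char) := original_feature_names.map String.toList
  let original_set : PySem.Set (List Char) := PySem.Set.ofList original
  let by_len : List (List Char) := PySem.List.sorted original (fun s => s.length) true
  transformed_feature_names.foldl (fun collapsed s =>
    if original_set.contains s.toList then collapsed ++ [s]
    else
      match aFirstMatch s.toList by_len with
      | some b => collapsed ++ [String.ofList b]
      | none => collapsed ++ [s]) []

-- ===== PORT B =====
-- 'for i in range(len(name)-1, -1, -1): if name[i] == "_" and name[:i] in original_set: return name[:i]'
def bScan (name : List Char) (oset : PySem.Set (List Char)) : Nat → Option (List Char)
  | 0 => none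
  | i + 1 =>
    if name.getD i ' ' == '_' && oset.contains (name.take i) then some (name.take i)
    else bScan name oset i

def bCollapse (name : List Char) (oset : PySem.Set (List Char)) : List Char :=
  if oset.contains name then name
  else
    match bScan name oset name.length with
    | some p => p
    | none => name

def collapse_onehot_feature_names_py_alt (transformed_feature_names : List String) (original_feature_names : List String) : List String :=
  let oset : PySem.Set (List Char) := PySem.Set.ofList (original_feature_names.map String.toList)
  transformed_feature_names.map (fun s => String.ofList (bCollapse s.toList oset))

-- ===== PRECONDITION & SPEC =====
def Spec_collapse_onehot_feature_names_py (transformed_feature_names : List String) (original_feature_names : List String) (out : List String) : Prop := out = collapse_onehot_feature_names_py_alt transformed_feature_names original_feature_names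
instance (transformed_feature_names : List String) (original_feature_names : List String) (out : List String) : Decidable (Spec_collapse_onehot_feature_names_py transformed_feature_names original_feature_names out) := by unfold Spec_collapse_onehot_feature_names_py; infer_instance

-- ===== CLAIM (what is proved, stated in full; the proofs are below) =====
def Claim_equal_collapse_onehot_feature_names_py : Prop := ∀ (transformed_feature_names : List String) (original_feature_names : List String), Dom_collapse_onehot_feature_names_py transformed_feature_names original_feature_names → Spec_collapse_onehot_feature_names_py transformed_feature_names original_feature_names (collapse_onehot_feature_names_py transformed_feature_names original_feature_names)

-- ===== LEMMAS AND PROOFS =====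

-- a base that matches (base + "_" is a prefix of name) is determined by its length
theorem pv_match_eq_take {b name : List Char} (h : (b ++ ['_']) <+: name) :
    b = name.take b.length := by
  have hb : b <+: name := (List.prefix_append b ['_']).trans h
  exact List.prefix_iff_eq_take.mp hb

theorem pv_match_len_lt {b name : List Char} (h : (b ++ ['_']) <+: name) :
    b.length < name.length := by
  have := h.length_le
  simp at this; omega

theorem pv_match_char {b name : List Char} (h : (b ++ ['_']) <+: name) :
    name.getD b.length ' ' = '_' := by
  obtain ⟨t, ht⟩ := h
  subst ht
  simp

theorem pv_char_match {name : List Char} {j : Nat} (hj : j < name.length)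
    (hc : name.getD j ' ' = '_') : (name.take j ++ ['_']) <+: name := by
  refine ⟨name.drop (j + 1), ?_⟩
  rw [List.getD_eq_getElem name ' ' hj] at hc
  calc name.take j ++ ['_'] ++ name.drop (j + 1)
      = name.take j ++ (name[j] :: name.drop (j + 1)) := by rw [hc]; simp
    _ = name.take j ++ name.drop j := by rw [List.getElem_cons_drop hj]
    _ = name := List.take_append_drop j name

-- A's inner loop on a length-descending list: first match is a longest match
theorem pv_aFM_spec (name : List Char) (l : List (List Char))
    (hp : l.Pairwise (fun a b => b.length ≤ a.length)) :
    match aFirstMatch name l with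
    | some b => b ∈ l ∧ (b ++ ['_']) <+: name ∧
        ∀ b' ∈ l, (b' ++ ['_']) <+: name → b'.length ≤ b.length
    | none => ∀ b' ∈ l, ¬ (b' ++ ['_']) <+: name := by
  induction l with
  | nil => simp [aFirstMatch]
  | cons c rest ih =>
    have hrest := ih hp.of_cons
    by_cases hc : (c ++ ['_']).isPrefixOf name
    · simp only [aFirstMatch, hc, if_pos]
      refine ⟨List.mem_cons_self, List.isPrefixOf_iff_prefix.mp hc, ?_⟩
      intro b' hb' _
      rcases List.mem_cons.mp hb' with h | h
      · subst h; exact le_refl _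
      · exact (List.pairwise_cons.mp hp).1 b' h
    · simp only [aFirstMatch, hc, if_neg, Bool.false_eq_true, not_false_iff]
      cases hm : aFirstMatch name rest with
      | some b =>
        rw [hm] at hrest
        refine ⟨List.mem_cons_of_mem c hrest.1, hrest.2.1, ?_⟩
        intro b' hb' hpre
        rcases List.mem_cons.mp hb' with h | h
        · exact absurd (List.isPrefixOf_iff_prefix.mpr (h ▸ hpre)) (by simpa using hc)
        · exact hrest.2.2 b' h hpre
      | none =>
        rw [hm] at hrest
        intro b' hb' hpre
        rcases List.mem_cons.mp hb' with h | h
        · exact absurd (List.isPrefixOf_iff_prefix.mpr (h ▸ hpre)) (by simpa using hc)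
        · exact hrest b' h hpre

-- B's descending index scan: first hit is a longest match among lengths < i
theorem pv_bScan_spec (name : List Char) (S : List (List Char)) (i : Nat)
    (hi : i ≤ name.length) :
    match bScan name S i with
    | some p => p ∈ S ∧ (p ++ ['_']) <+: name ∧
        ∀ b' ∈ S, (b' ++ ['_']) <+: name → b'.length < i → b'.length ≤ p.length
    | none => ∀ b' ∈ S, (b' ++ ['_']) <+: name → ¬ b'.length < i := by
  induction i with
  | zero => simp [bScan]
  | succ i ih =>
    have hlt : i < name.length := hi
    have htlen : (name.take i).length = i := by simp [Nat.le_of_lt hlt]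
    by_cases hg : (name.getD i ' ' == '_' && PySem.Set.contains S (name.take i)) = true
    · simp only [bScan]
      rw [if_pos hg]
      have ⟨h1, h2⟩ := Bool.and_eq_true_iff.mp hg
      refine ⟨(PySem.Set.contains_iff S _).mp h2, ?_, ?_⟩
      · exact pv_char_match hlt (by simpa using h1)
      · intro b' _ _ hblt
        omega
    · simp only [bScan]
      rw [if_neg hg]
      have ihs := ih (Nat.le_of_lt hlt)
      have hnot : ∀ b' ∈ S, (b' ++ ['_']) <+: name → b'.length ≠ i := by
        intro b' hb' hpre heq
        apply hg
        have hbt : b' = name.take i := heq ▸ pv_match_eq_take hpre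
        refine Bool.and_eq_true_iff.mpr ⟨?_, (PySem.Set.contains_iff S _).mpr (hbt ▸ hb')⟩
        simpa using heq ▸ pv_match_char hpre
      cases hm : bScan name S i with
      | some p =>
        rw [hm] at ihs
        refine ⟨ihs.1, ihs.2.1, ?_⟩
        intro b' hb' hpre hblt
        have := hnot b' hb' hpre
        exact ihs.2.2 b' hb' hpre (by omega)
      | none =>
        rw [hm] at ihs
        intro b' hb' hpre hblt
        have := hnot b' hb' hpre
        exact ihs b' hb' hpre (by omega)

-- the two searches agree
theorem pv_search_eq (name : List Char) (original : List (List Char)) :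
    aFirstMatch name (PySem.List.sorted original (fun s => s.length) true)
      = bScan name (PySem.Set.ofList original) name.length := by
  have hA := pv_aFM_spec name (PySem.List.sorted original (fun s => s.length) true)
    (PySem.List.sorted_pairwise_rev original (fun s => s.length))
  have hB := pv_bScan_spec name (PySem.Set.ofList original) name.length (le_refl _)
  have hmemA : ∀ b : List Char,
      b ∈ PySem.List.sorted original (fun s => s.length) true ↔ b ∈ original :=
    fun b => PySem.List.mem_sorted original (fun s => s.length) true b
  have hmemB : ∀ b : List Char, b ∈ PySem.Set.ofList original ↔ b ∈ original :=
    fun b => PySem.Set.mem_ofList original b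
  cases hA' : aFirstMatch name (PySem.List.sorted original (fun s => s.length) true) with
  | some a =>
    rw [hA'] at hA
    cases hB' : bScan name (PySem.Set.ofList original) name.length with
    | some p =>
      rw [hB'] at hB
      have h1 : p.length ≤ a.length :=
        hA.2.2 p ((hmemA p).mpr ((hmemB p).mp hB.1)) hB.2.1
      have h2 : a.length ≤ p.length :=
        hB.2.2 a ((hmemB a).mpr ((hmemA a).mp hA.1)) hA.2.1 (pv_match_len_lt hA.2.1)
      have : a.length = p.length := le_antisymm h2 h1
      rw [pv_match_eq_take hA.2.1, pv_match_eq_take hB.2.1, this]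
    | none =>
      rw [hB'] at hB
      exact absurd (pv_match_len_lt hA.2.1)
        (hB a ((hmemB a).mpr ((hmemA a).mp hA.1)) hA.2.1)
  | none =>
    rw [hA'] at hA
    cases hB' : bScan name (PySem.Set.ofList original) name.length with
    | some p =>
      rw [hB'] at hB
      exact absurd hB.2.1 (hA p ((hmemA p).mpr ((hmemB p).mp hB.1)))
    | none => rfl

-- per-name agreement
theorem pv_one_eq (s : String) (original : List (List Char)) :
    (if (PySem.Set.ofList original).contains s.toList then s
     else
       match aFirstMatch s.toList (PySem.List.sorted original (fun t => t.length) true) with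
       | some b => String.ofList b
       | none => s)
      = String.ofList (bCollapse s.toList (PySem.Set.ofList original)) := by
  unfold bCollapse
  by_cases hc : (PySem.Set.ofList original).contains s.toList
  · rw [if_pos hc, if_pos hc, String.ofList_toList]
  · rw [if_neg hc, if_neg hc, pv_search_eq]
    cases bScan s.toList (PySem.Set.ofList original) s.toList.length with
    | some p => rfl
    | none => simp [String.ofList_toList]

-- ===== VERDICT (by name: the statement is the Claim_ definition above) =====
theorem collapse_onehot_feature_names_py_spec : Claim_equal_collapse_onehot_feature_names_py := by
  intro tfn ofn _
  unfold Spec_collapse_onehot_feature_names_py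
  unfold collapse_onehot_feature_names_py collapse_onehot_feature_names_py_alt
  have hstep : (fun (collapsed : List String) (s : String) =>
      if (PySem.Set.ofList (ofn.map String.toList)).contains s.toList then collapsed ++ [s]
      else
        match aFirstMatch s.toList
            (PySem.List.sorted (ofn.map String.toList) (fun t => t.length) true) with
        | some b => collapsed ++ [String.ofList b]
        | none => collapsed ++ [s])
      = (fun collapsed s => collapsed ++
          [if (PySem.Set.ofList (ofn.map String.toList)).contains s.toList then s
           else
             match aFirstMatch s.toList
                 (PySem.List.sorted (ofn.map String.toList) (fun t => t.length) true) with
             | some b => String.ofList b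
             | none => s]) := by
    funext collapsed s
    split_ifs with h
    · rfl
    · cases aFirstMatch s.toList
        (PySem.List.sorted (ofn.map String.toList) (fun t => t.length) true) <;> rfl
  simp only [hstep, PySem.List.foldl_append_singleton_eq_map, List.nil_append]
  exact List.map_congr_left (fun s _ => pv_one_eq s (ofn.map String.toList))
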